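-- pv_equiv track=rewrite | github.com/nriet/algorithm | zj-cpcs/com/nriet/utils/ArrayUtils.py | cut_array
-- ===== SOURCE A (Python) =====
-- def cut_array(data_list, start_value, end_value):
--     '''
--     根据数组起始值切割数组
--     :param data:array
--     :param start_value:
--     :param end_value:
--     :return: array
--     '''
--
--     start = 0
--     end = 0
--     for i, data in enumerate(data_list):
--         if data == start_value:
--             start = i
--         elif data == end_value:
--             end = i
--     return data_list[start:end]
-- ===== SOURCE B (Python) =====
-- def cut_array(data_list, start_value, end_value):
--     # Backward scan: first match from the right is the last occurrence; stop early once both found.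
--     start = 0
--     end = 0
--     seen_start = False
--     seen_end = False
--     for i, d in reversed(list(enumerate(data_list))):
--         if d == start_value:
--             if not seen_start:
--                 start = i
--                 seen_start = True
--         elif d == end_value and not seen_end:
--             end = i
--             seen_end = True
--         if seen_start and seen_end:
--             break
--     return data_list[start:end]
-- ===== Notes on version B (the rewrite author's own statement) =====
-- stated objective: alternative
-- what changed: Replaces A's full forward scan that keeps overwriting start/end with a backward scan over reversed(enumerate(...)) that records only the first (i.e. last) occurrence of each value and breaks as soon as both are found.
import Mathlib
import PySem

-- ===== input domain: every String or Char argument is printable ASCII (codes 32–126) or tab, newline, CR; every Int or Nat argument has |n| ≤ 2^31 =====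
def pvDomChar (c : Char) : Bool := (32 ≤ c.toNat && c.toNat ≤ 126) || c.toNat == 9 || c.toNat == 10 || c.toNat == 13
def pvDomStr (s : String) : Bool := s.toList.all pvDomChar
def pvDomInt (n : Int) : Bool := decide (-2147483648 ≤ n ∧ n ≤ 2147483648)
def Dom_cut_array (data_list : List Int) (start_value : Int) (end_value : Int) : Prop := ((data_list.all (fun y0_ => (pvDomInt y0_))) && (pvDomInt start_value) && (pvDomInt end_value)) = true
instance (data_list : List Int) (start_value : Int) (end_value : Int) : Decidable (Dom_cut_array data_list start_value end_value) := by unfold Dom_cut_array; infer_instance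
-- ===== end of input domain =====

-- B replaces A's full forward scan by a backward scan with early exit; return values proved equal (alternative, same cost).
-- ===== PORT A =====
def cut_array (data_list : List Int) (start_value : Int) (end_value : Int) : List Int :=
  let se := (PySem.List.enumerate data_list 0).foldl
    (fun (p : Int × Int) (id : Int × Int) =>
      if id.2 = start_value then (id.1, p.2)
      else if id.2 = end_value then (p.1, id.1)
      else p) (0, 0)
  PySem.List.slice data_list (some se.1) (some se.2)

-- ===== PORT B =====
-- backward loop with flags and break (transliterates Source B's for/break)
def cutBack (start_value end_value : Int) :
    List (Int × Int) → Int → Int → Bool → Bool → Int × Int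
  | [], s, e, _, _ => (s, e)
  | (i, d) :: rest, s, e, bs, be =>
    let st :=
      if d = start_value then
        (if bs then (s, bs, e, be) else (i, true, e, be))
      else if d = end_value ∧ be = false then (s, bs, i, true)
      else (s, bs, e, be)
    if st.2.1 ∧ st.2.2.2 then (st.1, st.2.2.1)
    else cutBack start_value end_value rest st.1 st.2.2.1 st.2.1 st.2.2.2

def cut_array_alt (data_list : List Int) (start_value : Int) (end_value : Int) : List Int :=
  let se := cutBack start_value end_value
    ((PySem.List.enumerate data_list 0).reverse) 0 0 false false
  PySem.List.slice data_list (some se.1) (some se.2)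

-- ===== PRECONDITION & SPEC =====
def Spec_cut_array (data_list : List Int) (start_value : Int) (end_value : Int) (out : List Int) : Prop := out = cut_array_alt data_list start_value end_value
instance (data_list : List Int) (start_value : Int) (end_value : Int) (out : List Int) : Decidable (Spec_cut_array data_list start_value end_value out) := by unfold Spec_cut_array; infer_instance

-- ===== CLAIM (what is proved, stated in full; the proofs are below) =====
def Claim_equal_cut_array : Prop := ∀ (data_list : List Int) (start_value : Int) (end_value : Int), Dom_cut_array data_list start_value end_value → Spec_cut_array data_list start_value end_value (cut_array data_list start_value end_value)

-- ===== LEMMAS AND PROOFS =====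

-- closed form for A's fold: last matching index from the right, via find? on the reverse
theorem foldA_eq (sv ev : Int) (L : List (Int × Int)) : ∀ (s e : Int),
    L.foldl (fun (p : Int × Int) (id : Int × Int) =>
      if id.2 = sv then (id.1, p.2)
      else if id.2 = ev then (p.1, id.1)
      else p) (s, e)
    = (((L.reverse.find? (fun p => p.2 == sv)).map Prod.fst).getD s,
       ((L.reverse.find? (fun p => p.2 != sv && p.2 == ev)).map Prod.fst).getD e) := by
  induction L with
  | nil => intro s e; simp
  | cons x t ih =>
    intro s e
    simp only [List.foldl_cons, List.reverse_cons, List.find?_append]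
    by_cases h1 : x.2 = sv
    · rw [if_pos h1, ih]
      cases hf : t.reverse.find? (fun p => p.2 == sv) <;>
        cases hg : t.reverse.find? (fun p => p.2 != sv && p.2 == ev) <;>
          simp [h1]
    · rw [if_neg h1]
      by_cases h2 : x.2 = ev
      · have h3 : ¬ ev = sv := fun h => h1 (h ▸ h2)
        rw [if_pos h2, ih]
        cases hf : t.reverse.find? (fun p => p.2 == sv) <;>
          cases hg : t.reverse.find? (fun p => p.2 != sv && p.2 == ev) <;>
            simp [h2, h3]
      · rw [if_neg h2, ih]
        cases hf : t.reverse.find? (fun p => p.2 == sv) <;>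
          cases hg : t.reverse.find? (fun p => p.2 != sv && p.2 == ev) <;>
            simp [h1, h2]

-- closed form for B's backward scan with break: same find?-characterisation
theorem cutBack_eq (sv ev : Int) (R : List (Int × Int)) : ∀ (s e : Int) (bs be : Bool),
    cutBack sv ev R s e bs be
    = ((if bs then s else ((R.find? (fun p => p.2 == sv)).map Prod.fst).getD s),
       (if be then e else ((R.find? (fun p => p.2 != sv && p.2 == ev)).map Prod.fst).getD e)) := by
  induction R with
  | nil => intro s e bs be; cases bs <;> cases be <;> simp [cutBack]
  | cons x t ih =>
    intro s e bs be
    rw [cutBack]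
    by_cases h1 : x.2 = sv
    · cases bs <;> cases be <;> simp [h1, ih]
    · by_cases h2 : x.2 = ev
      · have h3 : ¬ ev = sv := fun h => h1 (h ▸ h2)
        cases bs <;> cases be <;> simp [h2, h3, ih]
      · cases bs <;> cases be <;> simp [h1, h2, ih]

-- ===== VERDICT (by name: the statement is the Claim_ definition above) =====
theorem cut_array_spec : Claim_equal_cut_array := by
  intro l sv ev _
  unfold Spec_cut_array cut_array cut_array_alt
  rw [foldA_eq, cutBack_eq]
  simp
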